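-- pv_equiv track=rewrite | github.com/kjh918/test1 | c.py | mer
-- ===== SOURCE A (Python) =====
-- def mer(lis_1: list,lis_2: list,n: int) -> int:
--     result = []
--     if n == 1:
--         return lis_2
--     else:
--         for i in lis_1:
--             for j in lis_2:
--                 result.append(i+j)
--         return mer(lis_1,result,n-1)
-- ===== SOURCE B (Python) =====
-- def mer(lis_1: list, lis_2: list, n: int) -> int:
--     current = lis_2
--     for _ in range(n - 1):
--         result = []
--         for i in lis_1:
--             for j in current:
--                 result.append(i + j)
--         current = result
--     return current
-- ===== Notes on version B (the rewrite author's own statement) =====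
-- stated objective: simpler
-- what changed: Replaced the tail recursion (which rebuilds the sum list and recurses with n-1 until n == 1) by a single iterative loop running n-1 times over an accumulator list.
import Mathlib
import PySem

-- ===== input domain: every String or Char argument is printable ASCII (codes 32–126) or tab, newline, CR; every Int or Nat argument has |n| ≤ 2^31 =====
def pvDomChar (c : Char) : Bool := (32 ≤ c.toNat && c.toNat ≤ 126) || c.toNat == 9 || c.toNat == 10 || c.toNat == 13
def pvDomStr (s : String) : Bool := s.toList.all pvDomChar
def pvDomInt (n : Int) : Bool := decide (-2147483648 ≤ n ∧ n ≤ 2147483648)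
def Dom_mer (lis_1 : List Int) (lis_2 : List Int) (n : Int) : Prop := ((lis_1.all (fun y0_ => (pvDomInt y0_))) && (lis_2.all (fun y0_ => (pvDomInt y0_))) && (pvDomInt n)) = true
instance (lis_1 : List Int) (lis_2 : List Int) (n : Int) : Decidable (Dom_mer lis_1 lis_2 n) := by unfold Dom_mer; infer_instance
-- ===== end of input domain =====

-- B replaces A's tail recursion by an iterative n-1 pass loop over an accumulator (simpler decomposition; same cost).


-- ===== PORT A =====
-- A recursive transliteration: if n == 1 return lis_2 else recurse on the nested-loop sum list with n-1.
-- Python diverges (RecursionError) for n < 1; that region is outside Pre_mer, and the port returns lis_2 there to be total.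
def mer (lis_1 : List Int) (lis_2 : List Int) (n : Int) : List Int :=
  if n = 1 then lis_2
  else if n < 1 then lis_2   -- unreachable under Pre_mer (Python raises RecursionError here)
  else
    mer lis_1
      (lis_1.foldl (fun result i => lis_2.foldl (fun result j => result ++ [i + j]) result) [])
      (n - 1)
termination_by (n - 1).toNat
decreasing_by omega

-- ===== PORT B =====
def mer_alt (lis_1 : List Int) (lis_2 : List Int) (n : Int) : List Int :=
  (PySem.List.pyRange 0 (n - 1) 1).foldl
    (fun current _ =>
      lis_1.foldl (fun result i => current.foldl (fun result j => result ++ [i + j]) result) [])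
    lis_2

-- ===== PRECONDITION & SPEC =====
-- Pre_ excludes n < 1, where Python A recurses without a base case and raises RecursionError.
def Pre_mer (lis_1 : List Int) (lis_2 : List Int) (n : Int) : Prop := 1 ≤ n
instance (lis_1 : List Int) (lis_2 : List Int) (n : Int) : Decidable (Pre_mer lis_1 lis_2 n) := by unfold Pre_mer; infer_instance
def pvWitness_mer : List Int × List Int × Int := ([1, 2], [3, 4], 2)

def Spec_mer (lis_1 : List Int) (lis_2 : List Int) (n : Int) (out : List Int) : Prop := out = mer_alt lis_1 lis_2 n
instance (lis_1 : List Int) (lis_2 : List Int) (n : Int) (out : List Int) : Decidable (Spec_mer lis_1 lis_2 n out) := by unfold Spec_mer; infer_instance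

-- ===== CLAIM (what is proved, stated in full; the proofs are below) =====
def Claim_equal_mer : Prop := ∀ (lis_1 : List Int) (lis_2 : List Int) (n : Int), Dom_mer lis_1 lis_2 n → Pre_mer lis_1 lis_2 n → Spec_mer lis_1 lis_2 n (mer lis_1 lis_2 n)

-- ===== LEMMAS AND PROOFS =====
-- the one-pass body both programs share
def merStep (lis_1 cur : List Int) : List Int :=
  lis_1.foldl (fun result i => cur.foldl (fun result j => result ++ [i + j]) result) []

-- folding a constant-in-the-element function over a list iterates it length-many times
theorem foldl_const_iterate {α β : Type} (f : α → α) (init : α) (l : List β) :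
    l.foldl (fun a _ => f a) init = f^[l.length] init := by
  induction l generalizing init with
  | nil => rfl
  | cons x xs ih => simp [List.foldl, ih, Function.iterate_succ_apply]

theorem mer_eq_iterate (lis_1 lis_2 : List Int) (k : Nat) :
    mer lis_1 lis_2 ((k : Int) + 1) = (merStep lis_1)^[k] lis_2 := by
  induction k generalizing lis_2 with
  | zero => simp [mer]
  | succ m ih =>
    rw [mer, if_neg (by omega), if_neg (by omega)]
    have e : ((m + 1 : Nat) : Int) + 1 - 1 = (m : Int) + 1 := by push_cast; ring
    rw [e, ih, Function.iterate_succ_apply]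
    rfl

theorem mer_alt_eq_iterate (lis_1 lis_2 : List Int) (n : Int) :
    mer_alt lis_1 lis_2 n = (merStep lis_1)^[(n - 1).toNat] lis_2 := by
  have h := foldl_const_iterate (merStep lis_1) lis_2 (PySem.List.pyRange 0 (n - 1) 1)
  simpa [mer_alt, merStep, PySem.List.length_pyRange_one] using h

-- ===== VERDICT (by name: the statement is the Claim_ definition above) =====
theorem mer_spec : Claim_equal_mer := by
  intro lis_1 lis_2 n _ hpre
  unfold Spec_mer
  have hn : n = ((n - 1).toNat : Int) + 1 := by unfold Pre_mer at hpre; omega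
  rw [mer_alt_eq_iterate, hn, mer_eq_iterate]
  simp
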